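-- pv_equiv track=rewrite | github.com/navchandar/lab | hospitals/scripts/hdfc_ergo_data_parser.py | merge_fragmented_rows
-- ===== SOURCE A (Python) =====
-- from typing import Any, Dict, List, Optional
--
-- def clean_text(text: Any) -> str:
--     """Standardizes text: removes newlines, trims whitespace, handles None."""
--     if not text:
--         return ""
--     return str(text).replace("\n", " ").strip()
--
-- def merge_fragmented_rows(raw_data: List[Dict[str, Any]]) -> List[Dict[str, Any]]:
--     """
--     Merges rows split across lines.
--     Relies on 'Sr. No.' being present to identify a 'Fresh' row.
--     """
--     merged_data = []
--     last_valid_row = None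
--
--     for row in raw_data:
--         # Get Sr. No. using the Standard Key
--         sr_no = clean_text(row.get("Sr. No."))
--
--         if sr_no:
--             # New Valid Record
--             last_valid_row = row
--             merged_data.append(last_valid_row)
--         else:
--             # Fragment Row (No Sr No) -> Merge into previous row
--             if last_valid_row:
--                 fragment_text = []
--                 # Collect text from all columns except identifier ones
--                 for key, val in row.items():
--                     if val and key not in ["Sr. No.", "Hospital Name"]:
--                         fragment_text.append(clean_text(val))
--
--                 # Append fragment text to a specific bucket in the parent row
--                 # We use a special key 'Overflow_Text' to store this soup
--                 if fragment_text:
--                     existing = last_valid_row.get("Overflow_Text", "")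
--                     last_valid_row["Overflow_Text"] = (
--                         existing + " " + " ".join(fragment_text)
--                     )
--
--     return merged_data
-- ===== SOURCE B (Python) =====
-- from typing import Any, Dict, List
--
--
-- def clean_text(text: Any) -> str:
--     """Standardizes text: removes newlines, trims whitespace, handles None."""
--     if not text:
--         return ""
--     return str(text).replace("\n", " ").strip()
--
--
-- def merge_fragmented_rows(raw_data: List[Dict[str, Any]]) -> List[Dict[str, Any]]:
--     """Two-pass version: first group rows under their head row, then fold each
--     group's fragments into the head's Overflow_Text (mutating the head in place)."""
--     # Pass 1: partition into (head, fragments) groups; fragments before the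
--     # first head row are discarded.
--     groups = []
--     i, n = 0, len(raw_data)
--     while i < n and not clean_text(raw_data[i].get("Sr. No.")):
--         i += 1
--     while i < n:
--         head = raw_data[i]
--         i += 1
--         frags = []
--         while i < n and not clean_text(raw_data[i].get("Sr. No.")):
--             frags.append(raw_data[i])
--             i += 1
--         groups.append((head, frags))
--
--     # Pass 2: fold each group's fragment text into the head dict.
--     for head, frags in groups:
--         for frag in frags:
--             parts = [clean_text(v) for k, v in frag.items()
--                      if v and k not in ("Sr. No.", "Hospital Name")]
--             if parts:
--                 head["Overflow_Text"] = (
--                     head.get("Overflow_Text", "") + " " + " ".join(parts)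
--                 )
--     return [head for head, _ in groups]
-- ===== Notes on version B (the rewrite author's own statement) =====
-- stated objective: alternative
-- what changed: Replaces A's single stateful fold (a last_valid_row pointer mutated while appending) by two separate passes: first partition the rows into (head, fragments) groups, then fold each group's fragment text into its head; same in-place mutation of the head dicts.
import Mathlib
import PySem

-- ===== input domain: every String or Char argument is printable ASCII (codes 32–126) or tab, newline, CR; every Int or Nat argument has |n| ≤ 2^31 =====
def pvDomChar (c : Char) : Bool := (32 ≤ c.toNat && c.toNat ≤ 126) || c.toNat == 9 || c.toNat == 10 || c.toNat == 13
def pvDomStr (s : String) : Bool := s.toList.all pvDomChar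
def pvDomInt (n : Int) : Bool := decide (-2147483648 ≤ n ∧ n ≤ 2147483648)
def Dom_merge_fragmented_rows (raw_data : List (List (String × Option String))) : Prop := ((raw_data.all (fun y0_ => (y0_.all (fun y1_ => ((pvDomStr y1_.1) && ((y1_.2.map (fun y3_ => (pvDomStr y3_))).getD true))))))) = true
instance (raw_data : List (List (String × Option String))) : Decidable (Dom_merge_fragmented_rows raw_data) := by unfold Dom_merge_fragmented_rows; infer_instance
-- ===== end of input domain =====

-- B is a two-pass (group-then-merge) re-implementation of A's one-pass stateful merge; the Python
-- functions mutate the input dicts in place (B performs the same mutation) and the equivalence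
-- proved here is about the RETURN value.

-- ===== PORT A =====
-- shared helper: the module's clean_text (argument is None or a str in this program)
def pvCleanText (v : Option String) : String :=
  match v with
  | none => ""
  | some s => if s = "" then "" else PySem.Str.strip (PySem.Str.replace s "\n" " ")

-- row.get(k)  (Python returns None when the key is absent)
def pvRowGet (row : List (String × Option String)) (k : String) : Option String :=
  ((PySem.Dict.mk row).get? k).getD none

-- Python truthiness of a cell value (None or a str here)
def pvTruthy : Option String → Bool
  | none => false
  | some s => s != ""

-- A's loop body.  Python's last_valid_row is an ALIAS of the last element appended to
-- merged_data, so its in-place mutation is modeled by updating the head of the reversed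
-- accumulator (merged_data is kept reversed; the result is reversed at the end).
def pvStepA (acc : List (List (String × Option String))) (row : List (String × Option String)) :
    List (List (String × Option String)) :=
  if pvCleanText (pvRowGet row "Sr. No.") != "" then
    row :: acc
  else
    match acc with
    | [] => acc
    | last :: rest =>
      let fragment_text := row.foldl (fun ft kv =>
        if pvTruthy kv.2 && !(kv.1 == "Sr. No." || kv.1 == "Hospital Name") then
          ft ++ [pvCleanText kv.2]
        else ft) []
      if fragment_text != [] then
        -- existing = last_valid_row.get("Overflow_Text", ""); Pre_ excludes a stored None here
        let existing := (((PySem.Dict.mk last).get? "Overflow_Text").getD (some "")).getD ""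
        ((PySem.Dict.mk last).insert "Overflow_Text"
            (some (existing ++ " " ++ PySem.Str.join " " fragment_text))).items :: rest
      else acc

def merge_fragmented_rows (raw_data : List (List (String × Option String))) : List (List (String × Option String)) :=
  (raw_data.foldl pvStepA []).reverse

-- ===== PORT B =====
def pvIsHead (row : List (String × Option String)) : Bool :=
  pvCleanText (pvRowGet row "Sr. No.") != ""

-- pass 1: (head, fragments) groups; fragments before the first head are dropped
def pvGroups : List (List (String × Option String)) →
    List ((List (String × Option String)) × List (List (String × Option String)))
  | [] => []
  | r :: rs =>
    if pvIsHead r then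
      (r, rs.takeWhile (fun x => !pvIsHead x)) :: pvGroups (rs.dropWhile (fun x => !pvIsHead x))
    else
      pvGroups rs
termination_by l => l.length
decreasing_by
  all_goals
    have := (List.dropWhile_sublist (l := rs) (fun x => !pvIsHead x)).length_le
    simp only [List.length_cons]
    omega

-- pass 2 inner step: fold one fragment's text into the head
def pvMergeFrag (head frag : List (String × Option String)) : List (String × Option String) :=
  let parts := frag.filterMap (fun kv =>
    if pvTruthy kv.2 && !(kv.1 == "Sr. No." || kv.1 == "Hospital Name") then
      some (pvCleanText kv.2)
    else none)
  if parts.isEmpty then head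
  else
    ((PySem.Dict.mk head).insert "Overflow_Text"
        (some ((((PySem.Dict.mk head).get? "Overflow_Text").getD (some "")).getD ""
          ++ " " ++ PySem.Str.join " " parts))).items

def merge_fragmented_rows_alt (raw_data : List (List (String × Option String))) : List (List (String × Option String)) :=
  (pvGroups raw_data).map (fun g => g.2.foldl pvMergeFrag g.1)

-- ===== PRECONDITION & SPEC =====
-- row stores None under 'Overflow_Text' (key present, value None)
def pvOverflowNone (row : List (String × Option String)) : Bool :=
  (PySem.Dict.mk row).get? "Overflow_Text" == some none

-- the row would contribute fragment text (some value truthy outside the identifier keys)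
def pvHasParts (row : List (String × Option String)) : Bool :=
  row.any (fun kv => pvTruthy kv.2 && !(kv.1 == "Sr. No." || kv.1 == "Hospital Name"))

-- Pre_ excludes exactly the inputs on which Python A raises TypeError (None + str): a head row
-- storing None under 'Overflow_Text' that is followed, before the next head row, by a fragment
-- row contributing text.
def Pre_merge_fragmented_rows (raw_data : List (List (String × Option String))) : Prop :=
  ∀ i ∈ List.range raw_data.length, ∀ j ∈ List.range raw_data.length,
    i < j →
    pvIsHead (raw_data.getD i []) = true →
    pvOverflowNone (raw_data.getD i []) = true →
    (∀ k ∈ List.range raw_data.length, i < k → k ≤ j → pvIsHead (raw_data.getD k []) = false) →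
    pvHasParts (raw_data.getD j []) = false
instance (raw_data : List (List (String × Option String))) : Decidable (Pre_merge_fragmented_rows raw_data) := by
  unfold Pre_merge_fragmented_rows; infer_instance

def pvWitness_merge_fragmented_rows : (List (List (String × Option String))) :=
  [[("Sr. No.", some "1"), ("x", some "a")], [("y", some "b")]]

def Spec_merge_fragmented_rows (raw_data : List (List (String × Option String))) (out : List (List (String × Option String))) : Prop := out = merge_fragmented_rows_alt raw_data
instance (raw_data : List (List (String × Option String))) (out : List (List (String × Option String))) : Decidable (Spec_merge_fragmented_rows raw_data out) := by unfold Spec_merge_fragmented_rows; infer_instance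

-- ===== CLAIM (what is proved, stated in full; the proofs are below) =====
def Claim_equal_merge_fragmented_rows : Prop := ∀ (raw_data : List (List (String × Option String))), Dom_merge_fragmented_rows raw_data → Pre_merge_fragmented_rows raw_data → Spec_merge_fragmented_rows raw_data (merge_fragmented_rows raw_data)

-- ===== LEMMAS AND PROOFS =====

-- A's foldl-with-append fragment collection equals B's filterMap
theorem pvFragText_eq (frag : List (String × Option String)) :
    ∀ acc, frag.foldl (fun ft kv =>
        if pvTruthy kv.2 && !(kv.1 == "Sr. No." || kv.1 == "Hospital Name") then
          ft ++ [pvCleanText kv.2]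
        else ft) acc
      = acc ++ frag.filterMap (fun kv =>
          if pvTruthy kv.2 && !(kv.1 == "Sr. No." || kv.1 == "Hospital Name") then
            some (pvCleanText kv.2)
          else none) := by
  induction frag with
  | nil => simp
  | cons kv rest ih =>
    intro acc
    rw [List.foldl_cons, List.filterMap_cons]
    cases h : (pvTruthy kv.2 && !(kv.1 == "Sr. No." || kv.1 == "Hospital Name")) with
    | false => simpa using ih acc
    | true => simpa using ih (acc ++ [pvCleanText kv.2])

-- one fragment step of A equals pvMergeFrag on a nonempty accumulator
theorem pvStepA_frag (last : List (String × Option String)) (rest : List (List (String × Option String)))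
    (row : List (String × Option String)) (h : pvIsHead row = false) :
    pvStepA (last :: rest) row = pvMergeFrag last row :: rest := by
  have h' : (pvCleanText (pvRowGet row "Sr. No.") != "") = false := by
    simpa [pvIsHead] using h
  unfold pvStepA pvMergeFrag
  rw [if_neg (by simp [h']), pvFragText_eq, List.nil_append]
  cases hL : row.filterMap (fun kv =>
      if pvTruthy kv.2 && !(kv.1 == "Sr. No." || kv.1 == "Hospital Name") then
        some (pvCleanText kv.2)
      else none) with
  | nil => rfl
  | cons a b => rfl

-- folding A's step over a run of fragments merges them all into the head
theorem pvFoldA_frags (fs : List (List (String × Option String)))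
    (hfs : ∀ f ∈ fs, pvIsHead f = false) :
    ∀ (last : List (String × Option String)) (rest : List (List (String × Option String))),
      fs.foldl pvStepA (last :: rest) = (fs.foldl pvMergeFrag last) :: rest := by
  induction fs with
  | nil => intro last rest; rfl
  | cons f fs ih =>
    intro last rest
    have hf : pvIsHead f = false := hfs f (by simp)
    rw [List.foldl_cons, pvStepA_frag last rest f hf, List.foldl_cons,
      ih (fun g hg => hfs g (by simp [hg]))]

-- main loop invariant, for a row list that is empty or starts with a head row
theorem pvMainAux : ∀ (n : Nat) (rows acc : List (List (String × Option String))),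
    rows.length ≤ n →
    (rows = [] ∨ ∃ r rs, rows = r :: rs ∧ pvIsHead r = true) →
    rows.foldl pvStepA acc =
      ((pvGroups rows).map (fun g => g.2.foldl pvMergeFrag g.1)).reverse ++ acc := by
  intro n
  induction n with
  | zero =>
    intro rows acc hlen _
    have : rows = [] := List.eq_nil_of_length_eq_zero (Nat.le_zero.mp hlen)
    subst this; simp [pvGroups]
  | succ n ih =>
    intro rows acc hlen hcond
    rcases hcond with rfl | ⟨r, rs, rfl, hr⟩
    · simp [pvGroups]
    · have hr' : (pvCleanText (pvRowGet r "Sr. No.") != "") = true := by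
        simpa [pvIsHead] using hr
      have hstep : pvStepA acc r = r :: acc := by unfold pvStepA; rw [if_pos hr']
      have hsplit : rs.takeWhile (fun x => !pvIsHead x) ++ rs.dropWhile (fun x => !pvIsHead x) = rs :=
        List.takeWhile_append_dropWhile
      have hfs : ∀ f ∈ rs.takeWhile (fun x => !pvIsHead x), pvIsHead f = false := by
        intro f hf
        have := List.mem_takeWhile_imp hf
        simpa using this
      have hcond' : rs.dropWhile (fun x => !pvIsHead x) = [] ∨
          ∃ r' rs', rs.dropWhile (fun x => !pvIsHead x) = r' :: rs' ∧ pvIsHead r' = true := by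
        cases hrest : rs.dropWhile (fun x => !pvIsHead x) with
        | nil => exact Or.inl rfl
        | cons a b =>
          refine Or.inr ⟨a, b, rfl, ?_⟩
          have hfind := List.find?_not_eq_head?_dropWhile (fun x => !pvIsHead x) rs
          rw [hrest, List.head?_cons] at hfind
          simpa using List.find?_some hfind
      have hlen' : (rs.dropWhile (fun x => !pvIsHead x)).length ≤ n := by
        have h1 := (List.dropWhile_sublist (l := rs) (fun x => !pvIsHead x)).length_le
        simp only [List.length_cons] at hlen
        omega
      have hg : pvGroups (r :: rs) =
          (r, rs.takeWhile (fun x => !pvIsHead x)) :: pvGroups (rs.dropWhile (fun x => !pvIsHead x)) := by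
        rw [pvGroups.eq_def]
        simp only [if_pos hr]
      rw [List.foldl_cons, hstep, hg]
      conv_lhs => rw [← hsplit]
      rw [List.foldl_append, pvFoldA_frags _ hfs r acc, ih _ _ hlen' hcond']
      simp

-- leading fragments (empty accumulator) are dropped by both versions
theorem pvTop (rows : List (List (String × Option String))) :
    rows.foldl pvStepA [] = ((pvGroups rows).map (fun g => g.2.foldl pvMergeFrag g.1)).reverse := by
  induction rows with
  | nil => simp [pvGroups]
  | cons r rs ih =>
    by_cases hr : pvIsHead r = true
    · have := pvMainAux (r :: rs).length (r :: rs) [] le_rfl (Or.inr ⟨r, rs, rfl, hr⟩)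
      simpa using this
    · have hr' : pvIsHead r = false := by simpa using hr
      have hrb : (pvCleanText (pvRowGet r "Sr. No.") != "") = false := by
        simpa [pvIsHead] using hr'
      have hstep : pvStepA [] r = [] := by unfold pvStepA; rw [if_neg (by simp [hrb])]
      have hg : pvGroups (r :: rs) = pvGroups rs := by
        rw [pvGroups.eq_def]
        simp only [hr', Bool.false_eq_true, if_false]
      rw [List.foldl_cons, hstep, ih, hg]

-- ===== VERDICT (by name: the statement is the Claim_ definition above) =====
theorem merge_fragmented_rows_spec : Claim_equal_merge_fragmented_rows := by
  intro raw_data _ _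
  unfold Spec_merge_fragmented_rows merge_fragmented_rows merge_fragmented_rows_alt
  rw [pvTop, List.reverse_reverse]
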